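-- pv_equiv track=rewrite | github.com/Knigt300/PM_Praktikum | A4.py | filter_drinks
-- ===== SOURCE A (Python) =====
-- def filter_drinks(drinks: dict, fltr= 'stand'):
--     '''Fitlert Getränkemetrik nach gegebenen Filter
--
--     Paramters
--     ---------
--     drinks: dict
--       Drinkmetric aus ``get_drink_metrics``
--
--     fltr: str
--       fltr-Wort, welcher bestimmt, wonach gefiltert wird.
--       Zuslässige Filterwörter: ``'stand'``, ``'time'``, ``'match'``
--       Bei üngültigem Schlüssel wird ``None`` ausgegeben
--
--     Returns
--     -------
--     Ein Dict, welches die Metrik anhand der Schlüsselwörter sorterit/errechnet hat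
--     '''
--     new_dict = {}
--     if fltr == 'stand':
--         i = 1
--     elif fltr == 'time':
--         i = 2
--     elif fltr == 'match':
--         i = 0
--     else:
--         return None
--
--     for key in drinks.keys():
--       new_key = key.split(' - ')[i]
--       if new_key in new_dict:
--           new_dict[new_key] += drinks[key]
--       else:
--           new_dict[new_key] = drinks[key]
--
--     return new_dict
-- ===== SOURCE B (Python) =====
-- def filter_drinks(drinks: dict, fltr='stand'):
--     if fltr == 'stand':
--         i = 1
--     elif fltr == 'time':
--         i = 2
--     elif fltr == 'match':
--         i = 0
--     else:
--         return None
--     comps = [key.split(' - ')[i] for key in drinks]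
--     pairs = list(zip(comps, drinks.values()))
--     return {c: sum(v for cc, v in pairs if cc == c) for c in dict.fromkeys(comps)}
-- ===== Notes on version B (the rewrite author's own statement) =====
-- stated objective: alternative
-- what changed: A aggregates in one pass via incremental dict updates (insert-or-+=); B computes the component of every key once, dedups the components in first-occurrence order, and builds the result with one sum over the (component, value) pairs per distinct component.
import Mathlib
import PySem

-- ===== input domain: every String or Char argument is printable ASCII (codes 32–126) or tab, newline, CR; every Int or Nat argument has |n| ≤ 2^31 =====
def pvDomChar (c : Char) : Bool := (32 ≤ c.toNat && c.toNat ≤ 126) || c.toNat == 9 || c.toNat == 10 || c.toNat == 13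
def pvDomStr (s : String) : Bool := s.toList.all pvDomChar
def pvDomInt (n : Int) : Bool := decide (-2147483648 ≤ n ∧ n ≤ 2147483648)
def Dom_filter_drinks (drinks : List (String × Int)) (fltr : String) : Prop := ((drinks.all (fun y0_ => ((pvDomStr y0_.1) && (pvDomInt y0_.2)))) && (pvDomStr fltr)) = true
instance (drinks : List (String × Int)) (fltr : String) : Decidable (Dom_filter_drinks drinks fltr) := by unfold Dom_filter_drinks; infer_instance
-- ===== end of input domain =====

-- B replaces A's incremental hash aggregation by "dedup the key components, then one sum per distinct component" (alternative decomposition, same results).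
-- B replaces A's incremental hash aggregation by "dedup the key components, then one sum per distinct component" (alternative decomposition, same results).
-- ===== PORT A =====
-- key.split(' - ')[i]; the out-of-range case (Python IndexError) is excluded by Pre_, the "" default never fires there
def pvCompA (key : String) (i : Int) : String :=
  PySem.List.pyGetD ((PySem.Str.split? key " - ").getD []) i ""

def pvLoopA (drinks : List (String × Int)) (i : Int) : PySem.Dict String Int :=
  drinks.foldl (fun d kv =>
    let nk := pvCompA kv.1 i
    if d.contains nk then d.insert nk (d.getD nk 0 + kv.2) else d.insert nk kv.2)
    PySem.Dict.empty

def filter_drinks (drinks : List (String × Int)) (fltr : String) : Option (List (String × Int)) :=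
  if fltr = "stand" then some (pvLoopA drinks 1).items
  else if fltr = "time" then some (pvLoopA drinks 2).items
  else if fltr = "match" then some (pvLoopA drinks 0).items
  else none

-- ===== PORT B =====
def pvGroupB (drinks : List (String × Int)) (i : Int) : List (String × Int) :=
  let comps := drinks.map (fun kv => pvCompA kv.1 i)
  let pairs := comps.zip (drinks.map (·.2))
  (PySem.List.dedup comps).map (fun c =>
    (c, (((pairs.filter (fun p => p.1 == c)).map (·.2)).sum)))

def filter_drinks_alt (drinks : List (String × Int)) (fltr : String) : Option (List (String × Int)) :=
  if fltr = "stand" then some (pvGroupB drinks 1)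
  else if fltr = "time" then some (pvGroupB drinks 2)
  else if fltr = "match" then some (pvGroupB drinks 0)
  else none

-- ===== PRECONDITION & SPEC =====
-- Pre_ excludes (a) keys whose ' - '-split has too few parts for the chosen filter: there Python A raises IndexError;
-- (b) association lists with duplicate keys, which a Python dict cannot represent (they collapse to the last value, so
-- the list corner is an artefact of the dict encoding; both Pythons, fed the collapsed dict, return the same value).
def Pre_filter_drinks (drinks : List (String × Int)) (fltr : String) : Prop :=
  (drinks.map Prod.fst).Nodup ∧
  (fltr = "stand" → ∀ p ∈ drinks, 1 < ((PySem.Str.split? p.1 " - ").getD []).length) ∧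
  (fltr = "time" → ∀ p ∈ drinks, 2 < ((PySem.Str.split? p.1 " - ").getD []).length)

instance (drinks : List (String × Int)) (fltr : String) : Decidable (Pre_filter_drinks drinks fltr) := by
  unfold Pre_filter_drinks; infer_instance

def pvWitness_filter_drinks : (List (String × Int)) × String :=
  ([("a - b - c", 1), ("x - b - d", 2), ("a - z - c", 3)], "stand")

def Spec_filter_drinks (drinks : List (String × Int)) (fltr : String) (out : Option (List (String × Int))) : Prop := out = filter_drinks_alt drinks fltr
instance (drinks : List (String × Int)) (fltr : String) (out : Option (List (String × Int))) : Decidable (Spec_filter_drinks drinks fltr out) := by unfold Spec_filter_drinks; infer_instance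

-- ===== CLAIM (what is proved, stated in full; the proofs are below) =====
def Claim_equal_filter_drinks : Prop := ∀ (drinks : List (String × Int)) (fltr : String), Dom_filter_drinks drinks fltr → Pre_filter_drinks drinks fltr → Spec_filter_drinks drinks fltr (filter_drinks drinks fltr)

-- ===== LEMMAS AND PROOFS =====
-- A's loop body is Dict.modify with default 0 and (· + v)
lemma pvStepA_eq_modify (d : PySem.Dict String Int) (nk : String) (v : Int) :
    (if d.contains nk then d.insert nk (d.getD nk 0 + v) else d.insert nk v) =
    d.modify nk 0 (· + v) := by
  by_cases h : d.contains nk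
  · simp [h, PySem.Dict.modify]
  · have h0 : d.getD nk 0 = 0 := by
      simp [PySem.Dict.getD, (PySem.Dict.get?_eq_none_iff_contains d nk).2 (by simp_all)]
    simp [h, PySem.Dict.modify, h0]

lemma pvGetD_foldl_modify_add (l : List (String × Int)) (d : PySem.Dict String Int) (c : String) :
    (l.foldl (fun d p => d.modify p.1 0 (· + p.2)) d).getD c 0 =
      d.getD c 0 + ((l.filter (fun p => p.1 == c)).map (·.2)).sum := by
  induction l generalizing d with
  | nil => simp
  | cons p t ih =>
    simp only [List.foldl_cons, ih, List.filter_cons]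
    by_cases h : p.1 = c
    · simp [h, add_assoc, add_comm, add_left_comm]
    · simp [PySem.Dict.getD_modify, h, (show ¬ c = p.1 from fun hc => h hc.symm)]

lemma pvLoopA_items (drinks : List (String × Int)) (i : Int) :
    (pvLoopA drinks i).items = pvGroupB drinks i := by
  have hfold : pvLoopA drinks i =
      (drinks.map (fun kv => (pvCompA kv.1 i, kv.2))).foldl
        (fun d p => d.modify p.1 0 (· + p.2)) PySem.Dict.empty := by
    rw [List.foldl_map]
    unfold pvLoopA
    congr 1
    funext d kv
    exact pvStepA_eq_modify d (pvCompA kv.1 i) kv.2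
  set l := drinks.map (fun kv => (pvCompA kv.1 i, kv.2)) with hl
  have hkeys : (pvLoopA drinks i).keys = PySem.List.dedup (l.map Prod.fst) := by
    rw [hfold, PySem.Dict.keys_foldl_modify_key l Prod.fst 0 (fun _ p => (· + p.2))]
    simp [PySem.Dict.empty, PySem.Dict.keys, PySem.Set.update, PySem.List.dedup,
      PySem.Set.ofList, PySem.Set.empty]
  have hnodup : (pvLoopA drinks i).keys.Nodup := by
    rw [hfold]
    exact PySem.Dict.nodup_keys_foldl_modify_key l Prod.fst 0 (fun _ p => (· + p.2)) _
      (by simp [PySem.Dict.empty, PySem.Dict.keys])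
  rw [PySem.Dict.items_eq_map_keys _ hnodup 0, hkeys]
  unfold pvGroupB
  simp only [List.zip_map', ← hl]
  have hmapfst : l.map Prod.fst = drinks.map (fun kv => pvCompA kv.1 i) := by
    simp [hl]
  rw [hmapfst]
  apply List.map_congr_left
  intro c _
  rw [hfold, pvGetD_foldl_modify_add]
  simp [PySem.Dict.getD, PySem.Dict.empty, PySem.Dict.get?]

-- ===== VERDICT (by name: the statement is the Claim_ definition above) =====
theorem filter_drinks_spec : Claim_equal_filter_drinks := by
  intro drinks fltr _ _
  unfold Spec_filter_drinks filter_drinks filter_drinks_alt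
  split_ifs <;> simp [pvLoopA_items]
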